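-- pv_equiv track=rewrite | github.com/zeldu18/Pink-Tax-Comparison | build_quality_queue.py | city_category_counts
-- ===== SOURCE A (Python) =====
-- from collections import Counter, defaultdict
--
-- def city_category_counts(
--     rows: list[dict[str, str | None]]
-- ) -> tuple[dict[str, int], dict[tuple[str, str], int]]:
--     """
--     Count unique observation keys per city and per (city, category).
--     """
--
--     city_observations: dict[str, set] = defaultdict(set)
--     city_cat_observations: dict[tuple[str, str], set] = defaultdict(set)
--
--     for row in rows:
--         city = str(row.get("city") or "").strip()
--         cat = str(row.get("category") or "").strip()
--         pair = str(row.get("pair_code") or "").strip()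
--         retailer = str(row.get("retailer") or "").strip()
--         observed = str(row.get("date_observed") or "").strip()
--
--         observation_key = (pair, retailer, observed)
--
--         if city and pair and retailer and observed:
--             city_observations[city].add(observation_key)
--         if city and cat and pair and retailer and observed:
--             city_cat_observations[(city, cat)].add(observation_key)
--
--     city_counts = {city: len(observations) for city, observations in city_observations.items()}
--     city_cat_counts = {
--         (city, cat): len(observations)
--         for (city, cat), observations in city_cat_observations.items()
--     }
--
--     return city_counts, city_cat_counts
-- ===== SOURCE B (Python) =====
-- from collections import Counter
--
--
-- def city_category_counts(rows):
--     """
--     Count unique observation keys per city and per (city, category).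
--
--     Staged pipeline instead of a single pass over mutable per-group sets:
--     (1) extract the five stripped fields of every row, (2) build the two
--     ordered-deduplicated lists of fully-qualified observation tuples with
--     dict.fromkeys, (3) aggregate each list with Counter grouped on its
--     city / (city, category) prefix.
--     """
--     recs = [
--         (
--             str(row.get("city") or "").strip(),
--             str(row.get("category") or "").strip(),
--             str(row.get("pair_code") or "").strip(),
--             str(row.get("retailer") or "").strip(),
--             str(row.get("date_observed") or "").strip(),
--         )
--         for row in rows
--     ]
--     city_obs = list(dict.fromkeys(
--         (c, p, r, o) for (c, _, p, r, o) in recs if c and p and r and o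
--     ))
--     cc_obs = list(dict.fromkeys(
--         t for t in recs if t[0] and t[1] and t[2] and t[3] and t[4]
--     ))
--     city_counts = dict(Counter(t[0] for t in city_obs))
--     city_cat_counts = dict(Counter((t[0], t[1]) for t in cc_obs))
--     return city_counts, city_cat_counts
-- ===== Notes on version B (the rewrite author's own statement) =====
-- stated objective: alternative
-- what changed: Replaces the single pass that mutates a dict-of-sets per group (plus a final len() pass) with a staged pipeline: extract all field tuples, order-deduplicate the fully-qualified observation tuples with dict.fromkeys, then aggregate each deduplicated list with Counter grouped on its city / (city, category) prefix.
import Mathlib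
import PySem

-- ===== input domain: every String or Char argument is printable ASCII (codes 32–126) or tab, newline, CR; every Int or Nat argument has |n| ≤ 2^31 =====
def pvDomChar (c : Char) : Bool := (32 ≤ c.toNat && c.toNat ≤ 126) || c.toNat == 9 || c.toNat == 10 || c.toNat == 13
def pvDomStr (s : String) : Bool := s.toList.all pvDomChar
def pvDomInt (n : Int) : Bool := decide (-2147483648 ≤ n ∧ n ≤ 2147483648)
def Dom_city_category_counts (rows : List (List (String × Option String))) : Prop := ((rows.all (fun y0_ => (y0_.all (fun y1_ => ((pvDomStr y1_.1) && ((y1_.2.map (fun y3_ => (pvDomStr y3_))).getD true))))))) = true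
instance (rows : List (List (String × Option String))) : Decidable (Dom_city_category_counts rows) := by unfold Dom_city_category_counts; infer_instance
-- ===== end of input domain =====

-- B replaces A's single pass over a mutable dict-of-sets per group (plus a final len() pass)
-- by a staged pipeline: extract all field tuples, order-deduplicate the fully-qualified
-- observation tuples (dict.fromkeys), then aggregate each list with Counter (objective: alternative).

-- shared field extraction: str(row.get(k) or "").strip()  (identical line in both Pythons)
def pvField (row : List (String × Option String)) (k : String) : String :=
  PySem.Str.strip (((PySem.Dict.ofList row).get? k).join.getD "")

-- ===== PORT A =====
-- A's defaultdict access-then-add: d[k].add(key)  =  d[k] = d.get(k, set()) ∪ {key}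
def pvAStep {κ : Type} [BEq κ] (d : PySem.Dict κ (PySem.Set (String × String × String)))
    (k : κ) (key : String × String × String) : PySem.Dict κ (PySem.Set (String × String × String)) :=
  d.modify k PySem.Set.empty (fun s => s.add key)

-- A's loop body over one row (the two guarded defaultdict updates)
def pvARow (st : PySem.Dict String (PySem.Set (String × String × String)) ×
              PySem.Dict (String × String) (PySem.Set (String × String × String)))
    (row : List (String × Option String)) :
    PySem.Dict String (PySem.Set (String × String × String)) ×
      PySem.Dict (String × String) (PySem.Set (String × String × String)) :=
  let city := pvField row "city"
  let cat := pvField row "category"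
  let pair := pvField row "pair_code"
  let retailer := pvField row "retailer"
  let observed := pvField row "date_observed"
  let key := (pair, retailer, observed)
  let st1 := if city ≠ "" ∧ pair ≠ "" ∧ retailer ≠ "" ∧ observed ≠ "" then
      (pvAStep st.1 city key, st.2) else st
  if city ≠ "" ∧ cat ≠ "" ∧ pair ≠ "" ∧ retailer ≠ "" ∧ observed ≠ "" then
      (st1.1, pvAStep st1.2 (city, cat) key) else st1

def city_category_counts (rows : List (List (String × Option String))) :
    (List (String × Int)) × (List (String × String × Int)) :=
  let fin := rows.foldl pvARow (PySem.Dict.empty, PySem.Dict.empty)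
  (fin.1.items.map (fun p => (p.1, (p.2.length : Int))),
   fin.2.items.map (fun p => (p.1.1, p.1.2, (p.2.length : Int))))

-- ===== PORT B =====
-- the five stripped fields of one row, as one tuple (Source B's recs comprehension element)
def pvExtract (row : List (String × Option String)) :
    String × String × String × String × String :=
  (pvField row "city", pvField row "category", pvField row "pair_code",
   pvField row "retailer", pvField row "date_observed")

-- Source B's city generator clause: (c, p, r, o) for (c, _, p, r, o) in recs if c and p and r and o
def pvQ1 (t : String × String × String × String × String) :
    Option (String × String × String × String) :=
  if t.1 ≠ "" ∧ t.2.2.1 ≠ "" ∧ t.2.2.2.1 ≠ "" ∧ t.2.2.2.2 ≠ "" then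
    some (t.1, t.2.2.1, t.2.2.2.1, t.2.2.2.2) else none

-- Source B's (city, category) generator clause: t for t in recs if all five fields
def pvQ2 (t : String × String × String × String × String) :
    Option (String × String × String × String × String) :=
  if t.1 ≠ "" ∧ t.2.1 ≠ "" ∧ t.2.2.1 ≠ "" ∧ t.2.2.2.1 ≠ "" ∧ t.2.2.2.2 ≠ "" then
    some t else none

def city_category_counts_alt (rows : List (List (String × Option String))) :
    (List (String × Int)) × (List (String × String × Int)) :=
  let recs := rows.map pvExtract
  let cityObs := PySem.List.dedup (recs.filterMap pvQ1)            -- list(dict.fromkeys(...))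
  let ccObs := PySem.List.dedup (recs.filterMap pvQ2)              -- list(dict.fromkeys(...))
  let cityCounts := PySem.Dict.counter (cityObs.map (fun t => t.1))        -- Counter(t[0] ...)
  let ccCounts := PySem.Dict.counter (ccObs.map (fun t => (t.1, t.2.1)))   -- Counter((t[0],t[1]) ...)
  (cityCounts.items, ccCounts.items.map (fun p => (p.1.1, p.1.2, p.2)))

-- ===== PRECONDITION & SPEC =====
def Spec_city_category_counts (rows : List (List (String × Option String))) (out : (List (String × Int)) × (List (String × String × Int))) : Prop := out = city_category_counts_alt rows
instance (rows : List (List (String × Option String))) (out : (List (String × Int)) × (List (String × String × Int))) : Decidable (Spec_city_category_counts rows out) := by unfold Spec_city_category_counts; infer_instance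

-- ===== CLAIM (what is proved, stated in full; the proofs are below) =====
def Claim_equal_city_category_counts : Prop := ∀ (rows : List (List (String × Option String))), Dom_city_category_counts rows → Spec_city_category_counts rows (city_category_counts rows)

-- ===== LEMMAS AND PROOFS =====

-- proof device: a single-pass dedup-and-count intermediate between A's fold and B's pipeline
def pvStep {κ α : Type} [BEq κ] [BEq α] (key : α → κ)
    (sc : PySem.Set α × PySem.Dict κ Int) (x : α) : PySem.Set α × PySem.Dict κ Int :=
  if sc.1.contains x then sc
  else (sc.1.add x, sc.2.insert (key x) (sc.2.getD (key x) 0 + 1))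

-- reassociation of a qualified 5-tuple into ((city, cat), observation key)
def pvG (t : String × String × String × String × String) :
    (String × String) × String × String × String := ((t.1, t.2.1), t.2.2)

def pvMidRow (st : (PySem.Set (String × String × String × String) × PySem.Dict String Int) ×
      (PySem.Set ((String × String) × String × String × String) × PySem.Dict (String × String) Int))
    (row : List (String × Option String)) :
    (PySem.Set (String × String × String × String) × PySem.Dict String Int) ×
      (PySem.Set ((String × String) × String × String × String) × PySem.Dict (String × String) Int) :=
  let t := pvExtract row
  let st1 := match pvQ1 t with
    | some x => (pvStep (fun y => y.1) st.1 x, st.2)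
    | none => st
  match pvQ2 t with
    | some x => (st1.1, pvStep (fun y => y.1) st1.2 (pvG x))
    | none => st1

-- the elements of L not yet in s, first occurrences only, in order
def pvNews {α : Type} [BEq α] (s : PySem.Set α) : List α → List α
  | [] => []
  | x :: L => if s.contains x then pvNews s L else x :: pvNews (s.add x) L

-- the coupling invariant between A's dict-of-sets and the mid (dedup-set, counter) pair
def pvInv {κ : Type} [BEq κ] (d : PySem.Dict κ (PySem.Set (String × String × String)))
    (sc : PySem.Set (κ × (String × String × String)) × PySem.Dict κ Int) : Prop :=
  d.keys.Nodup ∧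
  sc.2.items = d.items.map (fun p => (p.1, (p.2.length : Int))) ∧
  ∀ a b, (a, b) ∈ sc.1 ↔ ∃ s, (a, s) ∈ d.items ∧ b ∈ s

lemma pv_entry_unique {κ ν : Type} [BEq κ] [LawfulBEq κ] (d : PySem.Dict κ ν) {k : κ} {v w : ν}
    (h1 : (k, v) ∈ d.items) (h2 : (k, w) ∈ d.items) (hnd : d.keys.Nodup) : v = w := by
  have e1 := PySem.Dict.get?_of_mem_items d h1 hnd
  have e2 := PySem.Dict.get?_of_mem_items d h2 hnd
  exact Option.some.inj (e1.symm.trans e2)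

lemma pv_insert_self {κ ν : Type} [BEq κ] [LawfulBEq κ] (d : PySem.Dict κ ν) {k : κ} {v : ν}
    (h : (k, v) ∈ d.items) (hnd : d.keys.Nodup) : d.insert k v = d := by
  apply PySem.Dict.ext
  rw [PySem.Dict.items_insert_of_contains d v
    ((PySem.Dict.contains_iff_mem_keys d k).2 (List.mem_map_of_mem h))]
  have hid : ∀ p ∈ d.items, (if (p.1 == k) = true then (k, v) else p) = id p := by
    rintro ⟨p1, p2⟩ hp
    by_cases hpk : p1 = k
    · subst hpk
      have : p2 = v := pv_entry_unique d hp h hnd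
      subst this; simp
    · simp [hpk]
  rw [List.map_congr_left hid, List.map_id]

lemma pvStep_inv {κ : Type} [BEq κ] [LawfulBEq κ]
    (d : PySem.Dict κ (PySem.Set (String × String × String)))
    (sc : PySem.Set (κ × (String × String × String)) × PySem.Dict κ Int)
    (k : κ) (key : String × String × String) (h : pvInv d sc) :
    pvInv (pvAStep d k key) (pvStep (fun y => y.1) sc (k, key)) := by
  obtain ⟨hnd, hc, hm⟩ := h
  unfold pvAStep pvStep PySem.Dict.modify
  dsimp only
  by_cases hk : (k, key) ∈ sc.1
  · -- already seen: both sides are unchanged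
    rw [if_pos ((PySem.Set.contains_iff sc.1 (k, key)).2 hk)]
    obtain ⟨s, hs, hks⟩ := (hm k key).1 hk
    have hgd : d.getD k PySem.Set.empty = s :=
      PySem.Dict.getD_of_mem_items d hs hnd PySem.Set.empty
    have hstep : d.insert k ((d.getD k PySem.Set.empty).add key) = d := by
      rw [hgd]
      show d.insert k (s.add key) = d
      rw [PySem.Set.add_of_mem hks]
      exact pv_insert_self d hs hnd
    rw [hstep]
    exact ⟨hnd, hc, hm⟩
  · rw [if_neg (by simp [hk])]
    have hkeysc : sc.2.keys = d.keys := by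
      show sc.2.items.map _ = d.items.map _
      rw [hc, List.map_map]; rfl
    by_cases hcontains : d.contains k = true
    · -- k already present; key is new in its set
      obtain ⟨s, hs⟩ : ∃ s, (k, s) ∈ d.items := by
        obtain ⟨⟨p1, p2⟩, hp, hpk⟩ :=
          List.mem_map.1 ((PySem.Dict.contains_iff_mem_keys d k).1 hcontains)
        exact ⟨p2, by dsimp at hpk; exact hpk ▸ hp⟩
      have hkey : key ∉ s := fun hkey => hk ((hm k key).2 ⟨s, hs, hkey⟩)
      have hgd : d.getD k PySem.Set.empty = s :=
        PySem.Dict.getD_of_mem_items d hs hnd PySem.Set.empty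
      have hndc : sc.2.keys.Nodup := by rw [hkeysc]; exact hnd
      have hcInt : (k, (s.length : Int)) ∈ sc.2.items := by
        rw [hc]; exact List.mem_map.2 ⟨(k, s), hs, rfl⟩
      have hgdc : sc.2.getD k 0 = (s.length : Int) :=
        PySem.Dict.getD_of_mem_items sc.2 hcInt hndc 0
      have hcontc : sc.2.contains k = true := by
        rw [PySem.Dict.contains_iff_mem_keys, hkeysc]
        exact (PySem.Dict.contains_iff_mem_keys d k).1 hcontains
      have hadd : (d.getD k PySem.Set.empty).add key = s ++ [key] := by
        rw [hgd]; exact PySem.Set.add_of_not_mem hkey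
      rw [hadd]
      have hitems := PySem.Dict.items_insert_of_contains d (s ++ [key]) hcontains
      refine ⟨PySem.Dict.nodup_keys_insert d k _ hnd, ?_, ?_⟩
      · rw [PySem.Dict.items_insert_of_contains sc.2 _ hcontc, hitems, hc,
          List.map_map, List.map_map]
        apply List.map_congr_left
        rintro ⟨p1, p2⟩ hp
        by_cases hpk : p1 = k
        · subst hpk
          have hp2 : p2 = s := pv_entry_unique d hp hs hnd
          subst hp2
          simp [Function.comp, hgdc]
        · simp [Function.comp, hpk]
      · intro a b
        rw [PySem.Set.add_of_not_mem hk, hitems]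
        constructor
        · intro hab
          rcases List.mem_append.1 hab with hold | hnew
          · obtain ⟨s', hs', hbs'⟩ := (hm a b).1 hold
            by_cases hak : a = k
            · subst hak
              have : s' = s := pv_entry_unique d hs' hs hnd
              subst this
              exact ⟨s' ++ [key], List.mem_map.2 ⟨(a, s'), hs, by simp⟩,
                List.mem_append_left _ hbs'⟩
            · exact ⟨s', List.mem_map.2 ⟨(a, s'), hs', by simp [hak]⟩, hbs'⟩
          · have hab' : a = k ∧ b = key := by simpa [Prod.ext_iff] using hnew
            obtain ⟨ha', hb'⟩ := hab'
            subst ha'; subst hb'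
            exact ⟨s ++ [b], List.mem_map.2 ⟨(a, s), hs, by simp⟩, by simp⟩
        · rintro ⟨s', hs', hbs'⟩
          obtain ⟨⟨p1, p2⟩, hp, hpe⟩ := List.mem_map.1 hs'
          by_cases hpk : p1 = k
          · rw [if_pos (by simp [hpk])] at hpe
            injection hpe with h1 h2
            rw [← h2] at hbs'
            rcases List.mem_append.1 hbs' with hb | hb
            · exact List.mem_append_left _ ((hm a b).2 ⟨s, by rw [← h1]; exact hs, hb⟩)
            · have hb' : b = key := by simpa using hb
              simp [← h1, hb']
          · rw [if_neg (by simp [hpk])] at hpe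
            injection hpe with h1 h2
            refine List.mem_append_left _ ((hm a b).2 ⟨s', ?_, hbs'⟩)
            rw [← h1, ← h2]; exact hp
    · -- fresh key k: both sides append a new entry
      have hcf : d.contains k = false := by
        cases hcc : d.contains k
        · rfl
        · exact absurd hcc hcontains
      have hgd : d.getD k PySem.Set.empty = PySem.Set.empty :=
        PySem.Dict.getD_of_not_contains d PySem.Set.empty hcf
      have hcontc : sc.2.contains k = false := by
        cases hcc : sc.2.contains k
        · rfl
        · exact absurd ((PySem.Dict.contains_iff_mem_keys d k).2
            (hkeysc ▸ (PySem.Dict.contains_iff_mem_keys sc.2 k).1 hcc)) hcontains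
      have hgdc : sc.2.getD k 0 = 0 := PySem.Dict.getD_of_not_contains sc.2 0 hcontc
      have hadd : (d.getD k PySem.Set.empty).add key = [key] := by
        rw [hgd]
        show PySem.Set.empty.add key = [key]
        rw [PySem.Set.add_of_not_mem (by simp [PySem.Set.empty])]
        rfl
      rw [hadd]
      have hitems := PySem.Dict.items_insert_of_not_contains d [key] hcf
      refine ⟨PySem.Dict.nodup_keys_insert d k _ hnd, ?_, ?_⟩
      · rw [PySem.Dict.items_insert_of_not_contains sc.2 _ hcontc, hitems, hc, hgdc,
          List.map_append]
        simp
      · intro a b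
        rw [PySem.Set.add_of_not_mem hk, hitems]
        constructor
        · intro hab
          rcases List.mem_append.1 hab with hold | hnew
          · obtain ⟨s', hs', hbs'⟩ := (hm a b).1 hold
            exact ⟨s', List.mem_append_left _ hs', hbs'⟩
          · have hab' : a = k ∧ b = key := by simpa [Prod.ext_iff] using hnew
            obtain ⟨ha', hb'⟩ := hab'
            subst ha'; subst hb'
            exact ⟨[b], by simp, by simp⟩
        · rintro ⟨s', hs', hbs'⟩
          rcases List.mem_append.1 hs' with hold | hnew
          · exact List.mem_append_left _ ((hm a b).2 ⟨s', hold, hbs'⟩)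
          · have hn' : a = k ∧ s' = [key] := by simpa [Prod.ext_iff] using hnew
            obtain ⟨ha', hs''⟩ := hn'
            subst ha'; subst hs''
            have : b = key := by simpa using hbs'
            subst this; simp

lemma pvQ1_some {t : String × String × String × String × String}
    {x : String × String × String × String} (h : pvQ1 t = some x) :
    (t.1 ≠ "" ∧ t.2.2.1 ≠ "" ∧ t.2.2.2.1 ≠ "" ∧ t.2.2.2.2 ≠ "") ∧
      x = (t.1, t.2.2.1, t.2.2.2.1, t.2.2.2.2) := by
  unfold pvQ1 at h
  split_ifs at h with hcond
  · exact ⟨hcond, (Option.some.inj h).symm⟩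

lemma pvQ1_none {t : String × String × String × String × String} (h : pvQ1 t = none) :
    ¬(t.1 ≠ "" ∧ t.2.2.1 ≠ "" ∧ t.2.2.2.1 ≠ "" ∧ t.2.2.2.2 ≠ "") := by
  unfold pvQ1 at h
  split_ifs at h with hcond
  · exact hcond

lemma pvQ2_some {t x : String × String × String × String × String} (h : pvQ2 t = some x) :
    (t.1 ≠ "" ∧ t.2.1 ≠ "" ∧ t.2.2.1 ≠ "" ∧ t.2.2.2.1 ≠ "" ∧ t.2.2.2.2 ≠ "") ∧ x = t := by
  unfold pvQ2 at h
  split_ifs at h with hcond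
  · exact ⟨hcond, (Option.some.inj h).symm⟩

lemma pvQ2_none {t : String × String × String × String × String} (h : pvQ2 t = none) :
    ¬(t.1 ≠ "" ∧ t.2.1 ≠ "" ∧ t.2.2.1 ≠ "" ∧ t.2.2.2.1 ≠ "" ∧ t.2.2.2.2 ≠ "") := by
  unfold pvQ2 at h
  split_ifs at h with hcond
  · exact hcond

set_option maxHeartbeats 1000000 in
lemma pvRow_inv
    (da : PySem.Dict String (PySem.Set (String × String × String)) ×
          PySem.Dict (String × String) (PySem.Set (String × String × String)))
    (sb : (PySem.Set (String × String × String × String) × PySem.Dict String Int) ×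
          (PySem.Set ((String × String) × String × String × String) ×
            PySem.Dict (String × String) Int))
    (row : List (String × Option String))
    (h1 : pvInv da.1 sb.1) (h2 : pvInv da.2 sb.2) :
    pvInv (pvARow da row).1 (pvMidRow sb row).1 ∧
      pvInv (pvARow da row).2 (pvMidRow sb row).2 := by
  rcases hq1 : pvQ1 (pvExtract row) with _ | x1 <;>
    rcases hq2 : pvQ2 (pvExtract row) with _ | x2 <;>
    simp only [pvMidRow, hq1, hq2, pvG] <;>
    simp only [pvARow, pvExtract] at *
  · -- neither qualifies
    have hn1 := pvQ1_none hq1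
    have hn2 := pvQ2_none hq2
    rw [if_neg hn2, if_neg hn1]
    exact ⟨h1, h2⟩
  · -- only (city, category) qualifies (vacuous in fact, but provable uniformly)
    have hn1 := pvQ1_none hq1
    obtain ⟨hp2, hx2⟩ := pvQ2_some hq2
    subst hx2
    rw [if_pos hp2, if_neg hn1]
    exact ⟨h1, pvStep_inv _ _ _ _ h2⟩
  · -- only the city grouping qualifies
    obtain ⟨hp1, hx1⟩ := pvQ1_some hq1
    have hn2 := pvQ2_none hq2
    subst hx1
    rw [if_neg hn2, if_pos hp1]
    exact ⟨pvStep_inv _ _ _ _ h1, h2⟩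
  · -- both qualify
    obtain ⟨hp1, hx1⟩ := pvQ1_some hq1
    obtain ⟨hp2, hx2⟩ := pvQ2_some hq2
    subst hx1; subst hx2
    rw [if_pos hp2, if_pos hp1]
    exact ⟨pvStep_inv _ _ _ _ h1, pvStep_inv _ _ _ _ h2⟩

lemma pv_fold_inv (rows : List (List (String × Option String)))
    (da : PySem.Dict String (PySem.Set (String × String × String)) ×
          PySem.Dict (String × String) (PySem.Set (String × String × String)))
    (sb : (PySem.Set (String × String × String × String) × PySem.Dict String Int) ×
          (PySem.Set ((String × String) × String × String × String) ×
            PySem.Dict (String × String) Int))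
    (h1 : pvInv da.1 sb.1) (h2 : pvInv da.2 sb.2) :
    pvInv (List.foldl pvARow da rows).1 (List.foldl pvMidRow sb rows).1 ∧
    pvInv (List.foldl pvARow da rows).2 (List.foldl pvMidRow sb rows).2 := by
  induction rows generalizing da sb with
  | nil => exact ⟨h1, h2⟩
  | cons row rest ih =>
    simp only [List.foldl_cons]
    obtain ⟨g1, g2⟩ := pvRow_inv da sb row h1 h2
    exact ih _ _ g1 g2

-- the mid fold splits into two independent folds over the two qualified-tuple lists
lemma pv_split (rows : List (List (String × Option String)))
    (a : PySem.Set (String × String × String × String) × PySem.Dict String Int)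
    (b : PySem.Set ((String × String) × String × String × String) ×
        PySem.Dict (String × String) Int) :
    rows.foldl pvMidRow (a, b) =
      (((rows.map pvExtract).filterMap pvQ1).foldl (pvStep (fun y => y.1)) a,
       (((rows.map pvExtract).filterMap pvQ2).map pvG).foldl (pvStep (fun y => y.1)) b) := by
  induction rows generalizing a b with
  | nil => rfl
  | cons row rest ih =>
    simp only [List.foldl_cons, List.map_cons, List.filterMap_cons]
    rcases hq1 : pvQ1 (pvExtract row) with _ | x1 <;>
      rcases hq2 : pvQ2 (pvExtract row) with _ | x2 <;>
      simp only [pvMidRow, hq1, hq2, List.map_cons, List.foldl_cons] <;>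
      exact ih _ _

lemma pvNews_cons_mem {α : Type} [BEq α] [LawfulBEq α] (s : PySem.Set α) (x : α) (L : List α)
    (h : x ∈ s) : pvNews s (x :: L) = pvNews s L := by
  simp only [pvNews]
  rw [if_pos ((PySem.Set.contains_iff s x).2 h)]

lemma pvNews_cons_not_mem {α : Type} [BEq α] [LawfulBEq α] (s : PySem.Set α) (x : α) (L : List α)
    (h : x ∉ s) : pvNews s (x :: L) = x :: pvNews (s.add x) L := by
  have hc : PySem.Set.contains s x = false := by
    cases hcc : PySem.Set.contains s x
    · rfl
    · exact absurd ((PySem.Set.contains_iff _ _).1 hcc) h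
  simp only [pvNews]
  rw [if_neg (by rw [hc]; exact Bool.false_ne_true)]

-- one dedup-and-count fold, characterised: the set accumulates, the counter sees the new elements
lemma pvMidFold {κ α : Type} [BEq κ] [BEq α] [LawfulBEq α] (key : α → κ)
    (L : List α) (s : PySem.Set α) (c : PySem.Dict κ Int) :
    L.foldl (pvStep key) (s, c) =
      (L.foldl PySem.Set.add s,
       ((pvNews s L).map key).foldl (fun d k => d.insert k (d.getD k 0 + 1)) c) := by
  induction L generalizing s c with
  | nil => rfl
  | cons x L ih =>
    simp only [List.foldl_cons]
    by_cases hx : x ∈ s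
    · have hstep : pvStep key (s, c) x = (s, c) := by
        unfold pvStep; dsimp only; rw [if_pos ((PySem.Set.contains_iff s x).2 hx)]
      rw [hstep, ih, PySem.Set.add_of_mem hx, pvNews_cons_mem s x L hx]
    · have hsx : PySem.Set.contains s x = false := by
        cases hcc : PySem.Set.contains s x
        · rfl
        · exact absurd ((PySem.Set.contains_iff _ _).1 hcc) hx
      have hstep : pvStep key (s, c) x =
          (s.add x, c.insert (key x) (c.getD (key x) 0 + 1)) := by
        unfold pvStep; dsimp only; rw [if_neg (by rw [hsx]; exact Bool.false_ne_true)]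
      rw [hstep, ih, pvNews_cons_not_mem s x L hx]
      simp only [List.map_cons, List.foldl_cons]

lemma pvFoldAdd {α : Type} [BEq α] [LawfulBEq α] (L : List α) (s : PySem.Set α) :
    L.foldl PySem.Set.add s = s ++ pvNews s L := by
  induction L generalizing s with
  | nil => simp [pvNews]
  | cons x L ih =>
    simp only [List.foldl_cons]
    by_cases hx : x ∈ s
    · rw [PySem.Set.add_of_mem hx, ih, pvNews_cons_mem s x L hx]
    · rw [ih, pvNews_cons_not_mem s x L hx, PySem.Set.add_of_not_mem hx]
      simp

lemma pvNews_empty {α : Type} [BEq α] [LawfulBEq α] (L : List α) :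
    pvNews PySem.Set.empty L = PySem.Set.ofList L := by
  rw [PySem.Set.ofList_eq_foldl]
  have h := pvFoldAdd L PySem.Set.empty
  simp only [PySem.Set.empty, List.nil_append] at h ⊢
  exact h.symm

lemma pvG_inj : Function.Injective pvG := by
  rintro ⟨a1, a2, a3⟩ ⟨b1, b2, b3⟩ h
  simp only [pvG, Prod.mk.injEq] at h
  obtain ⟨⟨h1, h2⟩, h3⟩ := h
  simp [h1, h2, h3]

-- pvNews commutes with an injective map of the elements
lemma pvNews_map {α β : Type} [BEq α] [LawfulBEq α] [BEq β] [LawfulBEq β]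
    (f : α → β) (hf : Function.Injective f) (L : List α) (s : PySem.Set α) :
    pvNews (s.map f) (L.map f) = (pvNews s L).map f := by
  induction L generalizing s with
  | nil => rfl
  | cons x L ih =>
    by_cases hx : x ∈ s
    · have hfx : f x ∈ s.map f := List.mem_map_of_mem hx
      rw [List.map_cons, pvNews_cons_mem _ _ _ hfx, pvNews_cons_mem _ _ _ hx, ih s]
    · have hfx : f x ∉ s.map f := fun h => by
        obtain ⟨y, hy', hyx⟩ := List.mem_map.1 h
        exact hx (hf hyx ▸ hy')
      have haddm : PySem.Set.add (s.map f) (f x) = (s.add x).map f := by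
        rw [PySem.Set.add_of_not_mem hfx, PySem.Set.add_of_not_mem hx, List.map_append]
        rfl
      rw [List.map_cons, pvNews_cons_not_mem _ _ _ hfx, pvNews_cons_not_mem _ _ _ hx,
        List.map_cons, haddm, ih (s.add x)]

-- ===== VERDICT (by name: the statement is the Claim_ definition above) =====
theorem city_category_counts_spec : Claim_equal_city_category_counts := by
  intro rows _
  unfold Spec_city_category_counts city_category_counts city_category_counts_alt
  dsimp only
  have hinit1 : pvInv (κ := String) PySem.Dict.empty (PySem.Set.empty, PySem.Dict.empty) :=
    ⟨List.nodup_nil, rfl, by intro a b; simp [PySem.Set.empty, PySem.Dict.empty]⟩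
  have hinit2 : pvInv (κ := String × String) PySem.Dict.empty (PySem.Set.empty, PySem.Dict.empty) :=
    ⟨List.nodup_nil, rfl, by intro a b; simp [PySem.Set.empty, PySem.Dict.empty]⟩
  obtain ⟨i1, i2⟩ := pv_fold_inv rows (PySem.Dict.empty, PySem.Dict.empty)
    ((PySem.Set.empty, PySem.Dict.empty), (PySem.Set.empty, PySem.Dict.empty)) hinit1 hinit2
  obtain ⟨-, hc1, -⟩ := i1
  obtain ⟨-, hc2, -⟩ := i2
  have hsplit := pv_split rows (PySem.Set.empty, PySem.Dict.empty)
    (PySem.Set.empty, PySem.Dict.empty)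
  have e1 : (List.foldl pvMidRow ((PySem.Set.empty, PySem.Dict.empty),
        (PySem.Set.empty, PySem.Dict.empty)) rows).1.2
      = PySem.Dict.counter
          ((PySem.Set.ofList ((rows.map pvExtract).filterMap pvQ1)).map (fun t => t.1)) := by
    rw [hsplit]
    dsimp only
    rw [pvMidFold]
    dsimp only
    rw [pvNews_empty, PySem.Dict.foldl_insert_getD_add_one_eq_counter]
  have e2 : (List.foldl pvMidRow ((PySem.Set.empty, PySem.Dict.empty),
        (PySem.Set.empty, PySem.Dict.empty)) rows).2.2
      = PySem.Dict.counter
          ((PySem.Set.ofList ((rows.map pvExtract).filterMap pvQ2)).map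
            (fun t => (t.1, t.2.1))) := by
    rw [hsplit]
    dsimp only
    rw [pvMidFold]
    dsimp only
    have hmapnews : pvNews PySem.Set.empty (((rows.map pvExtract).filterMap pvQ2).map pvG)
        = (pvNews PySem.Set.empty ((rows.map pvExtract).filterMap pvQ2)).map pvG := by
      have h := pvNews_map pvG pvG_inj ((rows.map pvExtract).filterMap pvQ2) PySem.Set.empty
      simpa [PySem.Set.empty] using h
    rw [hmapnews, List.map_map, pvNews_empty, PySem.Dict.foldl_insert_getD_add_one_eq_counter]
    rfl
  have comp1 : (List.foldl pvARow (PySem.Dict.empty, PySem.Dict.empty) rows).1.items.map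
        (fun p => (p.1, (p.2.length : Int)))
      = (PySem.Dict.counter
          ((PySem.List.dedup ((rows.map pvExtract).filterMap pvQ1)).map (fun t => t.1))).items := by
    rw [← hc1, e1, PySem.List.dedup_eq_ofList]
  have hA2 : (List.foldl pvARow (PySem.Dict.empty, PySem.Dict.empty) rows).2.items.map
        (fun p => (p.1.1, p.1.2, (p.2.length : Int)))
      = (List.foldl pvMidRow ((PySem.Set.empty, PySem.Dict.empty),
          (PySem.Set.empty, PySem.Dict.empty)) rows).2.2.items.map
          (fun p => (p.1.1, p.1.2, p.2)) := by
    rw [hc2, List.map_map]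
    rfl
  have comp2 : (List.foldl pvARow (PySem.Dict.empty, PySem.Dict.empty) rows).2.items.map
        (fun p => (p.1.1, p.1.2, (p.2.length : Int)))
      = (PySem.Dict.counter
          ((PySem.List.dedup ((rows.map pvExtract).filterMap pvQ2)).map
            (fun t => (t.1, t.2.1)))).items.map (fun p => (p.1.1, p.1.2, p.2)) := by
    rw [hA2, e2, PySem.List.dedup_eq_ofList]
  exact Prod.ext comp1 comp2
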